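-- pv_equiv track=rewrite | github.com/OmarAlmighty/Introduction-to-Programming-Using-Python-Liang-1st-edtion | CH11/EX11.19.py | isConsecutiveFour
-- ===== SOURCE A (Python) =====
-- def isConsecutiveFour(values):
--     for i in range(len(values)):
--         for j in range(len(values[i])):
--             val = values[i][j]
--
--             # search horizontally
--             if j <= len(values[i]) - 4:
--                 v1 = values[i][j + 1]
--                 v2 = values[i][j + 2]
--                 v3 = values[i][j + 3]
--                 if val == v1 == v2 == v3:
--                     return True
--
--             # search vertically
--             if i <= len(values) - 4:
--                 v1 = values[i + 1][j]
--                 v2 = values[i + 2][j]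
--                 v3 = values[i + 3][j]
--                 if val == v1 == v2 == v3:
--                     return True
--
--             # search diagonally
--             if i <= len(values) - 4 and j <= len(values[i]) - 4:
--                 v1 = values[i + 1][j + 1]
--                 v2 = values[i + 2][j + 2]
--                 v3 = values[i + 3][j + 3]
--                 if val == v1 == v2 == v3:
--                     return True
--
--             # search diagonally
--             if i <= len(values) - 4 and j >= 3:
--                 v1 = values[i + 1][j - 1]
--                 v2 = values[i + 2][j - 2]
--                 v3 = values[i + 3][j - 3]
--                 if val == v1 == v2 == v3:
--                     return True
--     return False
-- ===== SOURCE B (Python) =====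
-- def isConsecutiveFour(values):
--     # Extract every maximal line (rows, columns, both diagonal families) and
--     # run a single run-length scan over each line.
--     n = len(values)
--     lines = list(values)
--     if n > 0 and all(len(row) == len(values[0]) for row in values):
--         m = len(values[0])
--         # columns
--         for j in range(m):
--             lines.append([values[i][j] for i in range(n)])
--         # down-right diagonals, starting on the first column / first row
--         for i in range(n):
--             lines.append([values[i + k][k] for k in range(min(n - i, m))])
--         for j in range(1, m):
--             lines.append([values[k][j + k] for k in range(min(n, m - j))])
--         # down-left diagonals, starting on the first row / last column
--         for j in range(m):
--             lines.append([values[k][j - k] for k in range(min(n, j + 1))])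
--         for i in range(1, n):
--             lines.append([values[i + k][m - 1 - k] for k in range(min(n - i, m))])
--     return any(_has_run4(line) for line in lines)
--
--
-- def _has_run4(line):
--     run = 1
--     for a, b in zip(line, line[1:]):
--         run = run + 1 if a == b else 1
--         if run >= 4:
--             return True
--     return False
-- ===== Notes on version B (the rewrite author's own statement) =====
-- stated objective: alternative
-- what changed: A tests four unrolled direction windows at every cell with guard arithmetic; B first extracts every maximal line of the grid (rows, columns, both diagonal families) and then runs a single run-length-counter scan over each line.
-- outside the precondition, e.g. on isConsecutiveFour([[1, 1], [1], [1], [1]]): A returns True, B returns False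
import Mathlib
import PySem

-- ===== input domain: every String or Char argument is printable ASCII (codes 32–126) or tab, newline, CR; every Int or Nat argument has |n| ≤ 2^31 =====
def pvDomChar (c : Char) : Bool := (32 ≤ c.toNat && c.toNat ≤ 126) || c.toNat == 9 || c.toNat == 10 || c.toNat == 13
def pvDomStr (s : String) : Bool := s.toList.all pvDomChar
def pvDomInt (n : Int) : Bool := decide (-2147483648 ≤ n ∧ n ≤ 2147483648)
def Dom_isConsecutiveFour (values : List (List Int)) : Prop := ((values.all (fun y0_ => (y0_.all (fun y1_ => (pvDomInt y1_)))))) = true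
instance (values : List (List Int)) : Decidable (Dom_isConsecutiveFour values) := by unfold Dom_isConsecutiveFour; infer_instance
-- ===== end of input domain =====

-- B replaces A's four unrolled per-cell direction probes by extracting every maximal
-- line of the grid and scanning each line once with a run-length counter (objective: alternative).

-- ===== PORT A =====
-- values[i][j], in-range under Pre_ (pyGetD); A's loop body, one cell
def pvAt (values : List (List Int)) (i j : Int) : Int :=
  PySem.List.pyGetD (PySem.List.pyGetD values i []) j 0

def pvCell (values : List (List Int)) (i j : Int) : Bool :=
  let rowLen : Int := (PySem.List.pyGetD values i []).length
  let n : Int := values.length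
  let val := pvAt values i j
  -- search horizontally
  (decide (j ≤ rowLen - 4) &&
    (val == pvAt values i (j + 1) && pvAt values i (j + 1) == pvAt values i (j + 2) &&
     pvAt values i (j + 2) == pvAt values i (j + 3))) ||
  -- search vertically
  (decide (i ≤ n - 4) &&
    (val == pvAt values (i + 1) j && pvAt values (i + 1) j == pvAt values (i + 2) j &&
     pvAt values (i + 2) j == pvAt values (i + 3) j)) ||
  -- search diagonally (down-right)
  ((decide (i ≤ n - 4) && decide (j ≤ rowLen - 4)) &&
    (val == pvAt values (i + 1) (j + 1) && pvAt values (i + 1) (j + 1) == pvAt values (i + 2) (j + 2) &&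
     pvAt values (i + 2) (j + 2) == pvAt values (i + 3) (j + 3))) ||
  -- search diagonally (down-left)
  ((decide (i ≤ n - 4) && decide (3 ≤ j)) &&
    (val == pvAt values (i + 1) (j - 1) && pvAt values (i + 1) (j - 1) == pvAt values (i + 2) (j - 2) &&
     pvAt values (i + 2) (j - 2) == pvAt values (i + 3) (j - 3)))

def isConsecutiveFour (values : List (List Int)) : Bool :=
  (PySem.List.pyRange 0 values.length 1).any (fun i =>
    (PySem.List.pyRange 0 ((PySem.List.pyGetD values i []).length : Int) 1).any (fun j =>
      pvCell values i j))

-- ===== PORT B =====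
-- values[i][j] with nonnegative in-range indices (B only indexes inside the grid)
def pvG (values : List (List Int)) (i j : Nat) : Int := (values.getD i []).getD j 0

-- the run-length scan of _has_run4's loop
def pvHasRun4Go : List (Int × Int) → Int → Bool
  | [], _ => false
  | (a, b) :: rest, run =>
      let run' := if a == b then run + 1 else 1
      if 4 ≤ run' then true else pvHasRun4Go rest run'

def pvHasRun4 (line : List Int) : Bool := pvHasRun4Go (line.zip line.tail) 1



def pvRect (values : List (List Int)) : Bool :=
  decide (0 < values.length) &&
    values.all (fun row => row.length == (values.headD []).length)

def pvLines (values : List (List Int)) : List (List Int) :=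
  let n := values.length
  if pvRect values then
    let m := (values.headD []).length
    values
    ++ (List.range m).map (fun j => (List.range n).map (fun i => pvG values i j))
    ++ (List.range n).map (fun i => (List.range (min (n - i) m)).map (fun k => pvG values (i + k) k))
    ++ (List.range' 1 (m - 1)).map (fun j => (List.range (min n (m - j))).map (fun k => pvG values k (j + k)))
    ++ (List.range m).map (fun j => (List.range (min n (j + 1))).map (fun k => pvG values k (j - k)))
    ++ (List.range' 1 (n - 1)).map (fun i => (List.range (min (n - i) m)).map (fun k => pvG values (i + k) (m - 1 - k)))
  else values

def isConsecutiveFour_alt (values : List (List Int)) : Bool :=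
  (pvLines values).any pvHasRun4

-- ===== PRECONDITION & SPEC =====
-- Pre_ excludes ragged grids with 4 or more rows: there A's vertical/diagonal probes index
-- shorter rows and usually raise IndexError, and where they happen not to, A's value is an
-- artefact of that accidental ragged indexing.
def Pre_isConsecutiveFour (values : List (List Int)) : Prop :=
  values.length < 4 ∨ ∀ row ∈ values, row.length = (values.headD []).length
instance (values : List (List Int)) : Decidable (Pre_isConsecutiveFour values) := by
  unfold Pre_isConsecutiveFour; infer_instance

def pvWitness_isConsecutiveFour : List (List Int) := [[1, 2], [3, 4], [5, 6], [1, 1]]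

def Spec_isConsecutiveFour (values : List (List Int)) (out : Bool) : Prop := out = isConsecutiveFour_alt values
instance (values : List (List Int)) (out : Bool) : Decidable (Spec_isConsecutiveFour values out) := by unfold Spec_isConsecutiveFour; infer_instance

-- ===== CLAIM (what is proved, stated in full; the proofs are below) =====
def Claim_equal_isConsecutiveFour : Prop := ∀ (values : List (List Int)), Dom_isConsecutiveFour values → Pre_isConsecutiveFour values → Spec_isConsecutiveFour values (isConsecutiveFour values)

-- ===== LEMMAS AND PROOFS =====

-- four consecutive equal entries somewhere in a line
def pvHR (l : List Int) : Prop :=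
  ∃ k, k + 3 < l.length ∧ l.getD k 0 = l.getD (k+1) 0 ∧
    l.getD (k+1) 0 = l.getD (k+2) 0 ∧ l.getD (k+2) 0 = l.getD (k+3) 0

lemma pvHR_map_range {L : Nat} {f : Nat → Int} :
    pvHR ((List.range L).map f) ↔
      ∃ k, k + 3 < L ∧ f k = f (k+1) ∧ f (k+1) = f (k+2) ∧ f (k+2) = f (k+3) := by
  have e : ∀ t, t < L → (List.map f (List.range L)).getD t 0 = f t :=
    fun t ht => PySem.List.getD_map_range f L t 0 ht
  unfold pvHR
  constructor
  · rintro ⟨k, hk, h1, h2, h3⟩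
    simp only [List.length_map, List.length_range] at hk
    rw [e k (by omega), e (k+1) (by omega)] at h1
    rw [e (k+1) (by omega), e (k+2) (by omega)] at h2
    rw [e (k+2) (by omega), e (k+3) (by omega)] at h3
    exact ⟨k, hk, h1, h2, h3⟩
  · rintro ⟨k, hk, h1, h2, h3⟩
    refine ⟨k, by simp only [List.length_map, List.length_range]; omega, ?_, ?_, ?_⟩
    · rw [e k (by omega), e (k+1) (by omega)]; exact h1
    · rw [e (k+1) (by omega), e (k+2) (by omega)]; exact h2
    · rw [e (k+2) (by omega), e (k+3) (by omega)]; exact h3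

lemma pvHR_shift {x y : Int} {l : List Int} {r : Nat} (hxy : x ≠ y) (h1 : 1 ≤ r) (h3 : r ≤ 3) :
    pvHR (List.replicate r x ++ y :: l) ↔ pvHR (y :: l) := by
  have gv : ∀ t : Nat, (List.replicate r x ++ y :: l).getD (r + t) 0 = (y :: l).getD t 0 := by
    intro t
    rw [List.getD_append_right _ _ _ (r + t) (by simp [List.length_replicate])]
    simp [List.length_replicate]
  constructor
  · rintro ⟨k, hk, e1, e2, e3⟩
    simp only [List.length_append, List.length_replicate, List.length_cons] at hk
    by_cases hkr : r ≤ k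
    · have g0 : (List.replicate r x ++ y :: l).getD k 0 = (y :: l).getD (k - r) 0 := by
        conv_lhs => rw [show k = r + (k - r) from by omega]
        exact gv (k - r)
      have g1 : (List.replicate r x ++ y :: l).getD (k+1) 0 = (y :: l).getD (k - r + 1) 0 := by
        conv_lhs => rw [show k + 1 = r + (k - r + 1) from by omega]
        exact gv (k - r + 1)
      have g2 : (List.replicate r x ++ y :: l).getD (k+2) 0 = (y :: l).getD (k - r + 2) 0 := by
        conv_lhs => rw [show k + 2 = r + (k - r + 2) from by omega]
        exact gv (k - r + 2)
      have g3 : (List.replicate r x ++ y :: l).getD (k+3) 0 = (y :: l).getD (k - r + 3) 0 := by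
        conv_lhs => rw [show k + 3 = r + (k - r + 3) from by omega]
        exact gv (k - r + 3)
      refine ⟨k - r, by simp only [List.length_cons]; omega, ?_, ?_, ?_⟩
      · rw [← g0, ← g1]; exact e1
      · rw [← g1, ← g2]; exact e2
      · rw [← g2, ← g3]; exact e3
    · exfalso
      have hkr' : k < r := by omega
      have hx : (List.replicate r x ++ y :: l).getD (r-1) 0 = x := by
        rw [List.getD_append _ _ _ (r-1) (by simp [List.length_replicate]; omega)]
        exact List.getD_replicate x (by omega)
      have hy : (List.replicate r x ++ y :: l).getD r 0 = y := by
        have h0 := gv 0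
        simp only [Nat.add_zero, List.getD_cons_zero] at h0
        exact h0
      have hcase : r - 1 = k ∨ r - 1 = k + 1 ∨ r - 1 = k + 2 := by omega
      rcases hcase with h | h | h
      · rw [h] at hx
        have hy' : (List.replicate r x ++ y :: l).getD (k+1) 0 = y := by
          rw [show k + 1 = r from by omega]; exact hy
        rw [hx, hy'] at e1
        exact hxy e1
      · rw [h] at hx
        have hy' : (List.replicate r x ++ y :: l).getD (k+2) 0 = y := by
          rw [show k + 2 = r from by omega]; exact hy
        rw [hx, hy'] at e2
        exact hxy e2
      · rw [h] at hx
        have hy' : (List.replicate r x ++ y :: l).getD (k+3) 0 = y := by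
          rw [show k + 3 = r from by omega]; exact hy
        rw [hx, hy'] at e3
        exact hxy e3
  · rintro ⟨k, hk, e1, e2, e3⟩
    refine ⟨r + k, ?_, ?_, ?_, ?_⟩
    · simp only [List.length_append, List.length_replicate, List.length_cons] at *; omega
    · rw [show r + k + 1 = r + (k+1) from by omega, gv, gv]; exact e1
    · rw [show r + k + 1 = r + (k+1) from by omega,
          show r + k + 2 = r + (k+2) from by omega, gv, gv]; exact e2
    · rw [show r + k + 2 = r + (k+2) from by omega,
          show r + k + 3 = r + (k+3) from by omega, gv, gv]; exact e3

lemma pvGo_iff (l : List Int) : ∀ (x : Int) (r : Nat), 1 ≤ r → r ≤ 3 →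
    (pvHasRun4Go ((x :: l).zip l) (r : Int) = true ↔ pvHR (List.replicate r x ++ l)) := by
  induction l with
  | nil =>
    intro x r h1 h3
    constructor
    · intro h; simp [pvHasRun4Go] at h
    · rintro ⟨k, hk, -⟩
      simp only [List.append_nil, List.length_replicate] at hk; omega
  | cons y l ih =>
    intro x r h1 h3
    have hz : (x :: y :: l).zip (y :: l) = (x, y) :: (y :: l).zip l := rfl
    rw [hz]
    by_cases hxy : x = y
    · by_cases hr3 : r = 3
      · subst hr3
        constructor
        · intro _
          subst hxy
          refine ⟨0, ?_, ?_, ?_, ?_⟩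
          · simp only [List.length_append, List.length_replicate, List.length_cons]; omega
          · simp [List.replicate]
          · simp [List.replicate]
          · simp [List.replicate]
        · intro _
          norm_num [pvHasRun4Go, hxy]
      · have hstep : pvHasRun4Go ((x, y) :: (y :: l).zip l) (r : Int)
            = pvHasRun4Go ((y :: l).zip l) ((r : Int) + 1) := by
          simp only [pvHasRun4Go, hxy, beq_self_eq_true, if_true]
          rw [if_neg (by omega)]
        rw [hstep, show ((r : Int) + 1) = ((r + 1 : Nat) : Int) from by push_cast; ring]
        rw [ih y (r+1) (by omega) (by omega)]
        have heq : List.replicate r x ++ y :: l = List.replicate (r+1) y ++ l := by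
          rw [hxy, List.replicate_succ', List.append_assoc]
          rfl
        rw [heq]
    · have hstep : pvHasRun4Go ((x, y) :: (y :: l).zip l) (r : Int)
          = pvHasRun4Go ((y :: l).zip l) 1 := by
        simp only [pvHasRun4Go, beq_iff_eq, hxy, if_false]
        rw [if_neg (by omega)]
      rw [hstep, show (1 : Int) = ((1 : Nat) : Int) from by norm_num]
      rw [ih y 1 (by omega) (by omega)]
      simp only [List.replicate_one, List.singleton_append]
      exact (pvHR_shift hxy h1 h3).symm

lemma pvHasRun4_iff (l : List Int) : pvHasRun4 l = true ↔ pvHR l := by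
  cases l with
  | nil =>
    constructor
    · intro h; simp [pvHasRun4, pvHasRun4Go] at h
    · rintro ⟨k, hk, -⟩; simp at hk
  | cons x rest =>
    have h := pvGo_iff rest x 1 (by omega) (by omega)
    simpa [pvHasRun4] using h

lemma pvG_congr2 {V : List (List Int)} {a b c d a' b' c' d' : Nat}
    (ha : a' = a) (hb : b' = b) (hc : c' = c) (hd : d' = d)
    (h : pvG V a b = pvG V c d) : pvG V a' b' = pvG V c' d' := by
  rw [ha, hb, hc, hd]; exact h

-- A's four window families as plain propositions
def pvPH (V : List (List Int)) : Prop :=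
  ∃ i k, i < V.length ∧ k + 3 < (V.getD i []).length ∧
    pvG V i k = pvG V i (k+1) ∧ pvG V i (k+1) = pvG V i (k+2) ∧ pvG V i (k+2) = pvG V i (k+3)

def pvPV (V : List (List Int)) : Prop :=
  ∃ i j, i + 3 < V.length ∧ j < (V.getD i []).length ∧
    pvG V i j = pvG V (i+1) j ∧ pvG V (i+1) j = pvG V (i+2) j ∧ pvG V (i+2) j = pvG V (i+3) j

def pvPD1 (V : List (List Int)) : Prop :=
  ∃ i j, i + 3 < V.length ∧ j + 3 < (V.getD i []).length ∧
    pvG V i j = pvG V (i+1) (j+1) ∧ pvG V (i+1) (j+1) = pvG V (i+2) (j+2) ∧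
    pvG V (i+2) (j+2) = pvG V (i+3) (j+3)

def pvPD2 (V : List (List Int)) : Prop :=
  ∃ i j, i + 3 < V.length ∧ 3 ≤ j ∧ j < (V.getD i []).length ∧
    pvG V i j = pvG V (i+1) (j-1) ∧ pvG V (i+1) (j-1) = pvG V (i+2) (j-2) ∧
    pvG V (i+2) (j-2) = pvG V (i+3) (j-3)

lemma pvCell_iff (V : List (List Int)) (i j : Nat) :
    pvCell V (i : Int) (j : Int) = true ↔
      ((j + 3 < (V.getD i []).length ∧
          pvG V i j = pvG V i (j+1) ∧ pvG V i (j+1) = pvG V i (j+2) ∧ pvG V i (j+2) = pvG V i (j+3)) ∨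
       (i + 3 < V.length ∧
          pvG V i j = pvG V (i+1) j ∧ pvG V (i+1) j = pvG V (i+2) j ∧ pvG V (i+2) j = pvG V (i+3) j) ∨
       (i + 3 < V.length ∧ j + 3 < (V.getD i []).length ∧
          pvG V i j = pvG V (i+1) (j+1) ∧ pvG V (i+1) (j+1) = pvG V (i+2) (j+2) ∧
          pvG V (i+2) (j+2) = pvG V (i+3) (j+3)) ∨
       (i + 3 < V.length ∧ 3 ≤ j ∧
          pvG V i j = pvG V (i+1) (j-1) ∧ pvG V (i+1) (j-1) = pvG V (i+2) (j-2) ∧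
          pvG V (i+2) (j-2) = pvG V (i+3) (j-3))) := by
  have ci1 : (i : Int) + 1 = ((i + 1 : Nat) : Int) := by push_cast; ring
  have ci2 : (i : Int) + 2 = ((i + 2 : Nat) : Int) := by push_cast; ring
  have ci3 : (i : Int) + 3 = ((i + 3 : Nat) : Int) := by push_cast; ring
  have cj1 : (j : Int) + 1 = ((j + 1 : Nat) : Int) := by push_cast; ring
  have cj2 : (j : Int) + 2 = ((j + 2 : Nat) : Int) := by push_cast; ring
  have cj3 : (j : Int) + 3 = ((j + 3 : Nat) : Int) := by push_cast; ring
  by_cases h3 : 3 ≤ j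
  · have d1 : (j : Int) - 1 = ((j - 1 : Nat) : Int) := by omega
    have d2 : (j : Int) - 2 = ((j - 2 : Nat) : Int) := by omega
    have d3 : (j : Int) - 3 = ((j - 3 : Nat) : Int) := by omega
    simp only [pvCell, pvAt, ci1, ci2, ci3, cj1, cj2, cj3, d1, d2, d3,
      PySem.List.pyGetD_natCast, Bool.or_eq_true, Bool.and_eq_true,
      decide_eq_true_eq, beq_iff_eq, pvG, and_assoc, or_assoc]
    constructor
    · rintro (⟨hg, hc⟩ | ⟨hg, hc⟩ | ⟨hg1, hg2, hc⟩ | ⟨hg1, hg2, hc⟩)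
      · exact Or.inl ⟨by omega, hc⟩
      · exact Or.inr (Or.inl ⟨by omega, hc⟩)
      · exact Or.inr (Or.inr (Or.inl ⟨by omega, by omega, hc⟩))
      · exact Or.inr (Or.inr (Or.inr ⟨by omega, by omega, hc⟩))
    · rintro (⟨hg, hc⟩ | ⟨hg, hc⟩ | ⟨hg1, hg2, hc⟩ | ⟨hg1, hg2, hc⟩)
      · exact Or.inl ⟨by omega, hc⟩
      · exact Or.inr (Or.inl ⟨by omega, hc⟩)
      · exact Or.inr (Or.inr (Or.inl ⟨by omega, by omega, hc⟩))
      · exact Or.inr (Or.inr (Or.inr ⟨by omega, by omega, hc⟩))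
  · simp only [pvCell, pvAt, ci1, ci2, ci3, cj1, cj2, cj3,
      PySem.List.pyGetD_natCast, Bool.or_eq_true, Bool.and_eq_true,
      decide_eq_true_eq, beq_iff_eq, pvG, and_assoc, or_assoc]
    constructor
    · rintro (⟨hg, hc⟩ | ⟨hg, hc⟩ | ⟨hg1, hg2, hc⟩ | ⟨hg1, hg2, hc⟩)
      · exact Or.inl ⟨by omega, hc⟩
      · exact Or.inr (Or.inl ⟨by omega, hc⟩)
      · exact Or.inr (Or.inr (Or.inl ⟨by omega, by omega, hc⟩))
      · exact absurd hg2 (by omega)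
    · rintro (⟨hg, hc⟩ | ⟨hg, hc⟩ | ⟨hg1, hg2, hc⟩ | ⟨hg1, hg2, hc⟩)
      · exact Or.inl ⟨by omega, hc⟩
      · exact Or.inr (Or.inl ⟨by omega, hc⟩)
      · exact Or.inr (Or.inr (Or.inl ⟨by omega, by omega, hc⟩))
      · exact absurd hg2 h3

lemma pvA_iff (V : List (List Int)) :
    isConsecutiveFour V = true ↔ pvPH V ∨ pvPV V ∨ pvPD1 V ∨ pvPD2 V := by
  unfold isConsecutiveFour
  simp only [PySem.List.pyGetD_natCast, PySem.List.pyRange_zero_natCast, List.any_map,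
    List.any_eq_true, List.mem_range, Function.comp_def]
  constructor
  · rintro ⟨i, hi, j, hj, hc⟩
    rcases (pvCell_iff V i j).1 hc with h | h | h | h
    · obtain ⟨hg, hc'⟩ := h
      exact Or.inl ⟨i, j, hi, hg, hc'⟩
    · obtain ⟨hg, hc'⟩ := h
      exact Or.inr (Or.inl ⟨i, j, hg, hj, hc'⟩)
    · obtain ⟨hg1, hg2, hc'⟩ := h
      exact Or.inr (Or.inr (Or.inl ⟨i, j, hg1, hg2, hc'⟩))
    · obtain ⟨hg1, hg2, hc'⟩ := h
      exact Or.inr (Or.inr (Or.inr ⟨i, j, hg1, hg2, hj, hc'⟩))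
  · rintro (⟨i, k, hi, hk, hc⟩ | ⟨i, j, hi, hj, hc⟩ | ⟨i, j, hi, hj, hc⟩ | ⟨i, j, hi, h3, hj, hc⟩)
    · exact ⟨i, hi, k, by omega, (pvCell_iff V i k).2 (Or.inl ⟨hk, hc⟩)⟩
    · exact ⟨i, by omega, j, hj, (pvCell_iff V i j).2 (Or.inr (Or.inl ⟨hi, hc⟩))⟩
    · exact ⟨i, by omega, j, by omega, (pvCell_iff V i j).2 (Or.inr (Or.inr (Or.inl ⟨hi, hj, hc⟩)))⟩
    · exact ⟨i, by omega, j, hj, (pvCell_iff V i j).2 (Or.inr (Or.inr (Or.inr ⟨hi, h3, hc⟩)))⟩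

lemma pvAlt_iff (V : List (List Int)) :
    isConsecutiveFour_alt V = true ↔ ∃ line ∈ pvLines V, pvHR line := by
  simp only [isConsecutiveFour_alt, List.any_eq_true]
  constructor
  · rintro ⟨l, hm, hr⟩; exact ⟨l, hm, (pvHasRun4_iff l).1 hr⟩
  · rintro ⟨l, hm, hr⟩; exact ⟨l, hm, (pvHasRun4_iff l).2 hr⟩

lemma pvRows_iff (V : List (List Int)) : (∃ line ∈ V, pvHR line) ↔ pvPH V := by
  constructor
  · rintro ⟨line, hmem, k, hk, c1, c2, c3⟩
    rcases List.mem_iff_getElem.1 hmem with ⟨i, hi, hget⟩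
    have hline : V.getD i [] = line := by rw [List.getD_eq_getElem _ _ hi]; exact hget
    refine ⟨i, k, hi, ?_, ?_, ?_, ?_⟩ <;> simp only [pvG, hline] <;> assumption
  · rintro ⟨i, k, hi, hk, c1, c2, c3⟩
    refine ⟨V.getD i [], ?_, k, hk, c1, c2, c3⟩
    rw [List.getD_eq_getElem _ _ hi]
    exact List.getElem_mem _

lemma pvCols_iff (V : List (List Int))
    (hm : ∀ i, i < V.length → (V.getD i []).length = (V.headD []).length) :
    (∃ j, j < (V.headD []).length ∧
        pvHR ((List.range V.length).map (fun i => pvG V i j))) ↔ pvPV V := by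
  constructor
  · rintro ⟨j, hj, h⟩
    rcases pvHR_map_range.1 h with ⟨k, hk, c1, c2, c3⟩
    exact ⟨k, j, hk, by rw [hm k (by omega)]; exact hj, c1, c2, c3⟩
  · rintro ⟨i, j, hi, hj, c1, c2, c3⟩
    refine ⟨j, ?_, pvHR_map_range.2 ⟨i, hi, c1, c2, c3⟩⟩
    rw [← hm i (by omega)]; exact hj

lemma pvD1_iff (V : List (List Int))
    (hm : ∀ i, i < V.length → (V.getD i []).length = (V.headD []).length) :
    ((∃ i0, i0 < V.length ∧
        pvHR ((List.range (min (V.length - i0) (V.headD []).length)).map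
          (fun k => pvG V (i0 + k) k))) ∨
     (∃ j0, 1 ≤ j0 ∧ j0 < 1 + ((V.headD []).length - 1) ∧
        pvHR ((List.range (min V.length ((V.headD []).length - j0))).map
          (fun k => pvG V k (j0 + k))))) ↔ pvPD1 V := by
  constructor
  · rintro (⟨i0, hi0, h⟩ | ⟨j0, hj1, hj2, h⟩)
    · rcases pvHR_map_range.1 h with ⟨k, hk, c1, c2, c3⟩
      refine ⟨i0 + k, k, by omega, by rw [hm _ (by omega)]; omega, ?_, ?_, ?_⟩
      · exact pvG_congr2 rfl rfl (by omega) rfl c1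
      · exact pvG_congr2 (by omega) rfl (by omega) rfl c2
      · exact pvG_congr2 (by omega) rfl (by omega) rfl c3
    · rcases pvHR_map_range.1 h with ⟨k, hk, c1, c2, c3⟩
      refine ⟨k, j0 + k, by omega, by rw [hm _ (by omega)]; omega, ?_, ?_, ?_⟩
      · exact pvG_congr2 rfl rfl rfl (by omega) c1
      · exact pvG_congr2 rfl (by omega) rfl (by omega) c2
      · exact pvG_congr2 rfl (by omega) rfl (by omega) c3
  · rintro ⟨i, j, hi, hj, c1, c2, c3⟩
    rw [hm i (by omega)] at hj
    by_cases hij : j ≤ i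
    · refine Or.inl ⟨i - j, by omega, pvHR_map_range.2 ⟨j, by omega, ?_, ?_, ?_⟩⟩
      · exact pvG_congr2 (by omega) rfl (by omega) rfl c1
      · exact pvG_congr2 (by omega) rfl (by omega) rfl c2
      · exact pvG_congr2 (by omega) rfl (by omega) rfl c3
    · refine Or.inr ⟨j - i, by omega, by omega, pvHR_map_range.2 ⟨i, by omega, ?_, ?_, ?_⟩⟩
      · exact pvG_congr2 rfl (by omega) (by omega) (by omega) c1
      · exact pvG_congr2 (by omega) (by omega) (by omega) (by omega) c2
      · exact pvG_congr2 (by omega) (by omega) (by omega) (by omega) c3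

lemma pvD2_iff (V : List (List Int))
    (hm : ∀ i, i < V.length → (V.getD i []).length = (V.headD []).length) :
    ((∃ j0, j0 < (V.headD []).length ∧
        pvHR ((List.range (min V.length (j0 + 1))).map (fun k => pvG V k (j0 - k)))) ∨
     (∃ i0, 1 ≤ i0 ∧ i0 < 1 + (V.length - 1) ∧
        pvHR ((List.range (min (V.length - i0) (V.headD []).length)).map
          (fun k => pvG V (i0 + k) ((V.headD []).length - 1 - k))))) ↔ pvPD2 V := by
  constructor
  · rintro (⟨j0, hj0, h⟩ | ⟨i0, hi1, hi2, h⟩)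
    · rcases pvHR_map_range.1 h with ⟨k, hk, c1, c2, c3⟩
      refine ⟨k, j0 - k, by omega, by omega, by rw [hm _ (by omega)]; omega, ?_, ?_, ?_⟩
      · exact pvG_congr2 rfl rfl rfl (by omega) c1
      · exact pvG_congr2 rfl (by omega) rfl (by omega) c2
      · exact pvG_congr2 rfl (by omega) rfl (by omega) c3
    · rcases pvHR_map_range.1 h with ⟨k, hk, c1, c2, c3⟩
      refine ⟨i0 + k, (V.headD []).length - 1 - k, by omega, by omega,
        by rw [hm _ (by omega)]; omega, ?_, ?_, ?_⟩
      · exact pvG_congr2 rfl rfl (by omega) (by omega) c1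
      · exact pvG_congr2 (by omega) (by omega) (by omega) (by omega) c2
      · exact pvG_congr2 (by omega) (by omega) (by omega) (by omega) c3
  · rintro ⟨i, j, hi, h3, hj, c1, c2, c3⟩
    rw [hm i (by omega)] at hj
    by_cases hs : i + j < (V.headD []).length
    · refine Or.inl ⟨i + j, by omega, pvHR_map_range.2 ⟨i, by omega, ?_, ?_, ?_⟩⟩
      · exact pvG_congr2 rfl (by omega) rfl (by omega) c1
      · exact pvG_congr2 (by omega) (by omega) (by omega) (by omega) c2
      · exact pvG_congr2 (by omega) (by omega) (by omega) (by omega) c3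
    · refine Or.inr ⟨i + j + 1 - (V.headD []).length, by omega, by omega,
        pvHR_map_range.2 ⟨(V.headD []).length - 1 - j, by omega, ?_, ?_, ?_⟩⟩
      · exact pvG_congr2 (by omega) (by omega) (by omega) (by omega) c1
      · exact pvG_congr2 (by omega) (by omega) (by omega) (by omega) c2
      · exact pvG_congr2 (by omega) (by omega) (by omega) (by omega) c3

lemma pvRect_spec (V : List (List Int)) (h : pvRect V = true) :
    0 < V.length ∧ ∀ i, i < V.length → (V.getD i []).length = (V.headD []).length := by
  simp only [pvRect, Bool.and_eq_true, decide_eq_true_eq, List.all_eq_true, beq_iff_eq] at h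
  refine ⟨h.1, fun i hi => ?_⟩
  exact h.2 (V.getD i []) (by rw [List.getD_eq_getElem _ _ hi]; exact List.getElem_mem _)

lemma pvMain (V : List (List Int)) (hPre : Pre_isConsecutiveFour V) :
    isConsecutiveFour V = isConsecutiveFour_alt V := by
  rw [Bool.eq_iff_iff, pvA_iff, pvAlt_iff]
  by_cases hr : pvRect V = true
  · rcases pvRect_spec V hr with ⟨-, hm⟩
    have hlines : pvLines V =
        V
        ++ (List.range (V.headD []).length).map
            (fun j => (List.range V.length).map (fun i => pvG V i j))
        ++ (List.range V.length).map
            (fun i0 => (List.range (min (V.length - i0) (V.headD []).length)).map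
              (fun k => pvG V (i0 + k) k))
        ++ (List.range' 1 ((V.headD []).length - 1)).map
            (fun j0 => (List.range (min V.length ((V.headD []).length - j0))).map
              (fun k => pvG V k (j0 + k)))
        ++ (List.range (V.headD []).length).map
            (fun j0 => (List.range (min V.length (j0 + 1))).map (fun k => pvG V k (j0 - k)))
        ++ (List.range' 1 (V.length - 1)).map
            (fun i0 => (List.range (min (V.length - i0) (V.headD []).length)).map
              (fun k => pvG V (i0 + k) ((V.headD []).length - 1 - k))) := by
      simp only [pvLines, hr, if_true]
    rw [hlines]
    simp only [List.mem_append, or_and_right, exists_or, List.mem_map, List.mem_range,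
      List.mem_range'_1, exists_exists_and_eq_and, or_assoc]
    rw [pvRows_iff]
    constructor
    · rintro (h | h | h | h)
      · exact Or.inl h
      · exact Or.inr (Or.inl ((pvCols_iff V hm).2 h))
      · rcases (pvD1_iff V hm).2 h with h' | h'
        · exact Or.inr (Or.inr (Or.inl h'))
        · rcases h' with ⟨j0, h1, h2, h3⟩
          exact Or.inr (Or.inr (Or.inr (Or.inl ⟨j0, ⟨h1, h2⟩, h3⟩)))
      · rcases (pvD2_iff V hm).2 h with h' | h'
        · exact Or.inr (Or.inr (Or.inr (Or.inr (Or.inl h'))))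
        · rcases h' with ⟨i0, h1, h2, h3⟩
          exact Or.inr (Or.inr (Or.inr (Or.inr (Or.inr ⟨i0, ⟨h1, h2⟩, h3⟩))))
    · rintro (h | h | h | h | h | h)
      · exact Or.inl h
      · exact Or.inr (Or.inl ((pvCols_iff V hm).1 h))
      · exact Or.inr (Or.inr (Or.inl ((pvD1_iff V hm).1 (Or.inl h))))
      · rcases h with ⟨j0, ⟨h1, h2⟩, h3⟩
        exact Or.inr (Or.inr (Or.inl ((pvD1_iff V hm).1 (Or.inr ⟨j0, h1, h2, h3⟩))))
      · exact Or.inr (Or.inr (Or.inr ((pvD2_iff V hm).1 (Or.inl h))))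
      · rcases h with ⟨i0, ⟨h1, h2⟩, h3⟩
        exact Or.inr (Or.inr (Or.inr ((pvD2_iff V hm).1 (Or.inr ⟨i0, h1, h2, h3⟩))))
  · have hrf : pvRect V = false := by
      revert hr; cases pvRect V <;> simp
    have hlines : pvLines V = V := by
      simp [pvLines, hrf]
    have hn : V.length < 4 := by
      rcases hPre with h | h
      · exact h
      · by_cases hV : V = []
        · subst hV; simp
        · exfalso
          apply hr
          simp only [pvRect, Bool.and_eq_true, decide_eq_true_eq, List.all_eq_true, beq_iff_eq]
          exact ⟨List.length_pos_iff.2 hV, fun row hrow => h row hrow⟩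
    rw [hlines, pvRows_iff]
    constructor
    · rintro (h | ⟨i, j, hi, -⟩ | ⟨i, j, hi, -⟩ | ⟨i, j, hi, -⟩)
      · exact h
      · omega
      · omega
      · omega
    · exact Or.inl

-- ===== VERDICT (by name: the statement is the Claim_ definition above) =====
theorem isConsecutiveFour_spec : Claim_equal_isConsecutiveFour := by
  intro values _ hPre
  unfold Spec_isConsecutiveFour
  exact pvMain values hPre
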